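-- pv_equiv track=rewrite | github.com/dantetemplar/competitive-programming | Codeforces - Codeforces Round 1053 (Div. 2)/B_Инкрементальный_путь.py | solve
-- ===== SOURCE A (Python) =====
-- def solve(n: int, m: int, S: str, A: list[int]) -> tuple[int, list[int]]:
--     blacks = set(A)
--     result = set(blacks)
--
--     pos = 1
--     for c in S:
--         if c == "A":
--             pos += 1
--         else:  # 'B'
--             y = pos + 1
--             while y in result:
--                 y += 1
--             pos = y
--
--         result.add(pos)
--
--         if c == "B":
--             y = pos + 1
--             while y in result:
--                 y += 1
--             pos = y
--
--     res = sorted(result)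
--     return len(res), res
-- ===== SOURCE B (Python) =====
-- def solve(n: int, m: int, S: str, A: list[int]) -> tuple[int, list[int]]:
--     result = set(A)
--     nxt = {}  # union-find "next free slot": nxt[p] = a position > p with (p, nxt[p]) all occupied
--
--     def find(y):
--         # smallest free position >= y, with path compression
--         path = []
--         while y in result:
--             path.append(y)
--             y = nxt.get(y, y + 1)
--         for p in path:
--             nxt[p] = y
--         return y
--
--     pos = 1
--     for c in S:
--         if c == "A":
--             pos += 1
--         else:
--             pos = find(pos + 1)
--         result.add(pos)
--         if c == "B":
--             pos = find(pos + 1)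
--
--     res = sorted(result)
--     return len(res), res
-- ===== Notes on version B (the rewrite author's own statement) =====
-- stated objective: alternative
-- what changed: B replaces A's repeated linear 'while y in result: y += 1' scans by a union-find 'next free slot' map with path compression (find follows nxt links and then points every visited position at the found free slot).
import Mathlib
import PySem

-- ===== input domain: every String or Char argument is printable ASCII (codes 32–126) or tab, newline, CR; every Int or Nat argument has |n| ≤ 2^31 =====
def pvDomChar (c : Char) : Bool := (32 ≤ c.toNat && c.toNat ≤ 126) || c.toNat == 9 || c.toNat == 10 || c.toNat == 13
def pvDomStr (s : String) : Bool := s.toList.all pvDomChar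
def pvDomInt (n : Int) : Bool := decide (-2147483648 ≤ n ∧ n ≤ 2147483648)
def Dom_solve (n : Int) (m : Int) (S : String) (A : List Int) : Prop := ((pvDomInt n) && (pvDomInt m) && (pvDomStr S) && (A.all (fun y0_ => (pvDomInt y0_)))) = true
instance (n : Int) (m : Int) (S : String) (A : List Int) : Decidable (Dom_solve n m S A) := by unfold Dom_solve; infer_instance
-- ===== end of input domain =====

-- B replaces A's repeated linear `while y in result: y += 1` scans by a union-find
-- "next free slot" map with path compression; same return value, alternative algorithm
-- (A's scans are already amortized linear, so no speed is claimed).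

-- ===== PORT A =====

/-- A's `while y in result: y += 1`, fuel-bounded; fuel `result.length + 1` always
suffices (among `result.length + 1` consecutive positions one is free), so this is
exact for A's unbounded loop. -/
def scanFree (fuel : Nat) (result : PySem.Set Int) (y : Int) : Int :=
  match fuel with
  | 0 => y
  | f + 1 => if result.contains y then scanFree f result (y + 1) else y

/-- one iteration of A's `for c in S` loop, state = (pos, result) -/
def solveStep (st : Int × PySem.Set Int) (c : Char) : Int × PySem.Set Int :=
  let pos := st.1
  let result := st.2
  let pos := if c = 'A' then pos + 1 else scanFree (result.length + 1) result (pos + 1)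
  let result := PySem.Set.add result pos
  let pos := if c = 'B' then scanFree (result.length + 1) result (pos + 1) else pos
  (pos, result)

def solve (n : Int) (m : Int) (S : String) (A : List Int) : Int × List Int :=
  let blacks : PySem.Set Int := PySem.Set.ofList A
  let result : PySem.Set Int := PySem.Set.ofList blacks
  let st := S.toList.foldl solveStep (1, result)
  let res := PySem.List.sorted st.2 (fun x => x) false
  ((res.length : Int), res)

-- ===== PORT B =====

/-- the `while` walk of Source B's `find`: follow `nxt` links (default `y + 1`) until a
free position, collecting the visited path; fuel `result.length + 1` always suffices. -/
def walkFree (fuel : Nat) (result : PySem.Set Int) (nxt : PySem.Dict Int Int) (y : Int)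
    (path : List Int) : Int × List Int :=
  match fuel with
  | 0 => (y, path)
  | f + 1 =>
    if result.contains y then walkFree f result nxt (nxt.getD y (y + 1)) (path ++ [y])
    else (y, path)

/-- Source B's `find`: walk to the first free position, then path-compress (`nxt[p] = z`). -/
def findB (result : PySem.Set Int) (nxt : PySem.Dict Int Int) (y : Int) :
    Int × PySem.Dict Int Int :=
  let w := walkFree (result.length + 1) result nxt y []
  (w.1, w.2.foldl (fun d p => d.insert p w.1) nxt)

/-- one iteration of B's `for c in S` loop, state = (pos, result, nxt) -/
def solveAltStep (st : Int × PySem.Set Int × PySem.Dict Int Int) (c : Char) :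
    Int × PySem.Set Int × PySem.Dict Int Int :=
  let pos := st.1
  let result := st.2.1
  let nxt := st.2.2
  let pn := if c = 'A' then (pos + 1, nxt) else findB result nxt (pos + 1)
  let result := PySem.Set.add result pn.1
  let pn := if c = 'B' then findB result pn.2 (pn.1 + 1) else pn
  (pn.1, result, pn.2)

def solve_alt (n : Int) (m : Int) (S : String) (A : List Int) : Int × List Int :=
  let result : PySem.Set Int := PySem.Set.ofList A
  let st := S.toList.foldl solveAltStep (1, result, PySem.Dict.empty)
  let res := PySem.List.sorted st.2.1 (fun x => x) false
  ((res.length : Int), res)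

-- ===== PRECONDITION & SPEC =====
def Spec_solve (n : Int) (m : Int) (S : String) (A : List Int) (out : Int × List Int) : Prop := out = solve_alt n m S A
instance (n : Int) (m : Int) (S : String) (A : List Int) (out : Int × List Int) : Decidable (Spec_solve n m S A out) := by unfold Spec_solve; infer_instance

-- ===== CLAIM (what is proved, stated in full; the proofs are below) =====
def Claim_equal_solve : Prop := ∀ (n : Int) (m : Int) (S : String) (A : List Int), Dom_solve n m S A → Spec_solve n m S A (solve n m S A)

-- ===== LEMMAS AND PROOFS =====

/-- `z` is the first position `≥ y` not in `r` -/
def IsFirstFree (r : List Int) (y z : Int) : Prop :=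
  y ≤ z ∧ z ∉ r ∧ ∀ w, y ≤ w → w < z → w ∈ r

/-- invariant of B's `nxt` map: each link points strictly forward across occupied positions -/
def NxtInv (nxt : PySem.Dict Int Int) (r : List Int) : Prop :=
  ∀ p q, nxt.get? p = some q → p < q ∧ ∀ w, p ≤ w → w < q → w ∈ r

theorem isFirstFree_unique {r : List Int} {y z z' : Int}
    (h : IsFirstFree r y z) (h' : IsFirstFree r y z') : z = z' := by
  rcases h with ⟨hy, hz, hall⟩
  rcases h' with ⟨hy', hz', hall'⟩
  rcases lt_trichotomy z z' with hlt | he | hgt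
  · exact absurd (hall' z hy hlt) hz
  · exact he
  · exact absurd (hall z' hy' hgt) hz'

/-- pigeonhole: among `r.length + 1` consecutive integers one is not in `r` -/
theorem exists_free (r : List Int) (y : Int) :
    ∃ k : Nat, k < r.length + 1 ∧ (y + (k : Int)) ∉ r := by
  by_contra h
  rw [not_exists] at h
  simp only [not_and, not_not] at h
  have hsub : ((List.range (r.length + 1)).map (fun k : Nat => y + (k : Int))) ⊆ r := by
    intro x hx
    rcases List.mem_map.1 hx with ⟨k, hk, rfl⟩
    exact h k (List.mem_range.1 hk)
  have hnd : ((List.range (r.length + 1)).map (fun k : Nat => y + (k : Int))).Nodup := by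
    refine (List.nodup_range).map ?_
    intro a b hab
    simpa using hab
  have hle := (List.subperm_of_subset hnd hsub).length_le
  simp only [List.length_map, List.length_range] at hle
  omega

theorem scanFree_spec (r : PySem.Set Int) :
    ∀ (fuel : Nat) (y : Int), (∃ k : Nat, k < fuel ∧ (y + (k : Int)) ∉ r) →
    IsFirstFree r y (scanFree fuel r y) := by
  intro fuel
  induction fuel with
  | zero => intro y ⟨k, hk, _⟩; omega
  | succ f ih =>
    intro y ⟨k, hk, hkf⟩
    by_cases hy : y ∈ r
    · have hred : scanFree (f + 1) r y = scanFree f r (y + 1) := by simp [scanFree, hy]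
      have hk0 : k ≠ 0 := by rintro rfl; simp at hkf; exact hkf hy
      have hih : IsFirstFree r (y + 1) (scanFree f r (y + 1)) := by
        refine ih (y + 1) ⟨k - 1, by omega, ?_⟩
        have hcast : y + 1 + ((k - 1 : Nat) : Int) = y + (k : Int) := by omega
        rw [hcast]; exact hkf
      rcases hih with ⟨h1, h2, h3⟩
      rw [hred]
      refine ⟨by omega, h2, ?_⟩
      intro w hw1 hw2
      by_cases hwy : w = y
      · exact hwy ▸ hy
      · exact h3 w (by omega) hw2
    · have hred : scanFree (f + 1) r y = y := by simp [scanFree, hy]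
      rw [hred]
      exact ⟨le_refl y, hy, by intro w h1 h2; omega⟩

theorem walkFree_spec (r : PySem.Set Int) {nxt : PySem.Dict Int Int} (hInv : NxtInv nxt r) :
    ∀ (fuel : Nat) (y : Int) (path : List Int),
    (∃ k : Nat, k < fuel ∧ (y + (k : Int)) ∉ r) →
    IsFirstFree r y (walkFree fuel r nxt y path).1 ∧
    ∀ p ∈ (walkFree fuel r nxt y path).2,
      p ∈ path ∨ (y ≤ p ∧ p < (walkFree fuel r nxt y path).1 ∧ p ∈ r) := by
  intro fuel
  induction fuel with
  | zero => intro y path ⟨k, hk, _⟩; omega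
  | succ f ih =>
    intro y path ⟨k, hk, hkf⟩
    by_cases hy : y ∈ r
    · set y' := nxt.getD y (y + 1) with hy'def
      have hop : y < y' ∧ ∀ w, y ≤ w → w < y' → w ∈ r := by
        rcases hq : nxt.get? y with _ | q
        · constructor
          · simp [hy'def, PySem.Dict.getD_eq_get?_getD, hq]
          · intro w h1 h2
            simp [hy'def, PySem.Dict.getD_eq_get?_getD, hq] at h2
            have hwy : w = y := by omega
            exact hwy ▸ hy
        · have hiv := hInv y q hq
          simp only [hy'def, PySem.Dict.getD_eq_get?_getD, hq, Option.getD_some]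
          exact hiv
      have hk0 : k ≠ 0 := by rintro rfl; simp at hkf; exact hkf hy
      have hyy : y < y' := hop.1
      have hle : y' ≤ y + (k : Int) := by
        by_contra hgt
        exact hkf (hop.2 (y + (k : Int)) (by omega) (by omega))
      have hwit : ∃ k' : Nat, k' < f ∧ (y' + (k' : Int)) ∉ r := by
        refine ⟨(y + (k : Int) - y').toNat, by omega, ?_⟩
        have hcast : y' + (((y + (k : Int) - y').toNat : Nat) : Int) = y + (k : Int) := by
          omega
        rw [hcast]; exact hkf
      have IH := ih y' (path ++ [y]) hwit
      rcases IH with ⟨⟨h1, h2, h3⟩, hpath⟩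
      have hred : walkFree (f + 1) r nxt y path = walkFree f r nxt y' (path ++ [y]) := by
        simp [walkFree, hy, hy'def]
      rw [hred]
      constructor
      · refine ⟨by omega, h2, ?_⟩
        intro w hw1 hw2
        by_cases hwy : w < y'
        · exact hop.2 w hw1 hwy
        · exact h3 w (by omega) hw2
      · intro p hp
        rcases hpath p hp with hmem | ⟨ha, hb, hc⟩
        · rcases List.mem_append.1 hmem with hm | hm
          · exact Or.inl hm
          · simp at hm
            subst hm
            have hyz : p < (walkFree f r nxt y' (path ++ [p])).1 := by
              rcases lt_or_eq_of_le (le_trans hyy.le h1) with hlt | heq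
              · exact hlt
              · exact absurd (heq ▸ hy) h2
            exact Or.inr ⟨le_refl p, hyz, hy⟩
        · exact Or.inr ⟨by omega, hb, hc⟩
    · have hred : walkFree (f + 1) r nxt y path = (y, path) := by simp [walkFree, hy]
      rw [hred]
      exact ⟨⟨le_refl y, hy, by intro w h1 h2; omega⟩, fun p hp => Or.inl hp⟩

theorem NxtInv_insert {nxt : PySem.Dict Int Int} {r : List Int} (h : NxtInv nxt r)
    {p z : Int} (hpz : p < z) (hint : ∀ w, p ≤ w → w < z → w ∈ r) :
    NxtInv (nxt.insert p z) r := by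
  intro a b hab
  rw [PySem.Dict.get?_insert] at hab
  by_cases hap : a = p
  · simp [hap] at hab
    exact hab ▸ ⟨hap ▸ hpz, hap ▸ hint⟩
  · simp [hap] at hab
    exact h a b hab

theorem NxtInv_foldl_insert {r : List Int} {z : Int} :
    ∀ (path : List Int) (nxt : PySem.Dict Int Int), NxtInv nxt r →
    (∀ p ∈ path, p < z ∧ ∀ w, p ≤ w → w < z → w ∈ r) →
    NxtInv (path.foldl (fun d p => d.insert p z) nxt) r := by
  intro path
  induction path with
  | nil => intro nxt h _; exact h
  | cons p ps ih =>
    intro nxt h hall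
    simp only [List.foldl_cons]
    refine ih _ (NxtInv_insert h (hall p (by simp)).1 (hall p (by simp)).2) ?_
    intro q hq
    exact hall q (by simp [hq])

theorem NxtInv_mono {nxt : PySem.Dict Int Int} {r : PySem.Set Int} (h : NxtInv nxt r) (x : Int) :
    NxtInv nxt (PySem.Set.add r x) := by
  intro a b hab
  refine ⟨(h a b hab).1, fun w h1 h2 => ?_⟩
  exact (PySem.Set.mem_add _ _ _).2 (Or.inl ((h a b hab).2 w h1 h2))

theorem findB_eq {r : PySem.Set Int} {nxt : PySem.Dict Int Int} (hInv : NxtInv nxt r) (y : Int) :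
    (findB r nxt y).1 = scanFree (r.length + 1) r y ∧ NxtInv (findB r nxt y).2 r := by
  obtain ⟨k, hk, hkf⟩ := exists_free r y
  have hw := walkFree_spec r hInv (r.length + 1) y [] ⟨k, hk, hkf⟩
  have hs := scanFree_spec r (r.length + 1) y ⟨k, hk, hkf⟩
  have heq : (walkFree (r.length + 1) r nxt y []).1 = scanFree (r.length + 1) r y :=
    isFirstFree_unique hw.1 hs
  constructor
  · simpa [findB] using heq
  · simp only [findB]
    refine NxtInv_foldl_insert _ _ hInv ?_
    intro p hp
    rcases hw.2 p hp with hm | ⟨h1, h2, h3⟩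
    · simp at hm
    · exact ⟨h2, fun w hw1 hw2 => hw.1.2.2 w (by omega) hw2⟩

theorem NxtInv_empty (r : PySem.Set Int) : NxtInv PySem.Dict.empty r := by
  intro p q h
  simp [PySem.Dict.get?_empty] at h

theorem loop_eq : ∀ (cs : List Char) (pos : Int) (r : PySem.Set Int) (nxt : PySem.Dict Int Int),
    NxtInv nxt r →
    (cs.foldl solveAltStep (pos, r, nxt)).1 = (cs.foldl solveStep (pos, r)).1 ∧
    (cs.foldl solveAltStep (pos, r, nxt)).2.1 = (cs.foldl solveStep (pos, r)).2 ∧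
    NxtInv (cs.foldl solveAltStep (pos, r, nxt)).2.2 (cs.foldl solveAltStep (pos, r, nxt)).2.1 := by
  intro cs
  induction cs with
  | nil => intro pos r nxt h; exact ⟨rfl, rfl, h⟩
  | cons c cs ih =>
    intro pos r nxt h
    simp only [List.foldl_cons]
    by_cases hA : c = 'A'
    · have hB : ¬ c = 'B' := by subst hA; decide
      have hstep : solveAltStep (pos, r, nxt) c = (pos + 1, PySem.Set.add r (pos + 1), nxt) := by
        simp [solveAltStep, hA]
      have hstepA : solveStep (pos, r) c = (pos + 1, PySem.Set.add r (pos + 1)) := by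
        simp [solveStep, hA]
      rw [hstep, hstepA]
      exact ih _ _ _ (NxtInv_mono h (pos + 1))
    · have hf := findB_eq h (pos + 1)
      set z := scanFree (r.length + 1) r (pos + 1) with hz
      set nxt₁ := (findB r nxt (pos + 1)).2 with hn1
      have hfz : findB r nxt (pos + 1) = (z, nxt₁) := by
        rw [← hf.1, hn1]
      set r' := PySem.Set.add r z with hr'
      have hInv1 : NxtInv nxt₁ r' := NxtInv_mono hf.2 z
      by_cases hB : c = 'B'
      · have hf2 := findB_eq hInv1 (z + 1)
        set z2 := scanFree (r'.length + 1) r' (z + 1) with hz2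
        set nxt₂ := (findB r' nxt₁ (z + 1)).2 with hn2
        have hfz2 : findB r' nxt₁ (z + 1) = (z2, nxt₂) := by
          rw [← hf2.1, hn2]
        have hstep : solveAltStep (pos, r, nxt) c = (z2, r', nxt₂) := by
          simp only [solveAltStep, hfz, hB, if_true]
          simp [← hr', hfz2]
        have hstepA : solveStep (pos, r) c = (z2, r') := by
          simp [solveStep, hB]
          rw [← hz, ← hr', ← hz2]
          exact ⟨rfl, rfl⟩
        rw [hstep, hstepA]
        exact ih _ _ _ hf2.2
      · have hstep : solveAltStep (pos, r, nxt) c = (z, r', nxt₁) := by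
          simp only [solveAltStep, hA, if_false, hfz, hB]
          simp [← hr']
        have hstepA : solveStep (pos, r) c = (z, r') := by
          simp [solveStep, hA, hB]
          rw [← hz, ← hr']
          exact ⟨rfl, rfl⟩
        rw [hstep, hstepA]
        exact ih _ _ _ hInv1

-- ===== VERDICT (by name: the statement is the Claim_ definition above) =====
theorem solve_spec : Claim_equal_solve := by
  intro n m S A _
  unfold Spec_solve
  have h := loop_eq S.toList 1 (PySem.Set.ofList A) PySem.Dict.empty (NxtInv_empty _)
  simp only [solve, solve_alt, PySem.Set.ofList_ofList]
  rw [h.2.1]
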